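-- pv_equiv track=rewrite | github.com/xiaoschannel/papertrail | pages/ingest/file_index.py | build_display_state
-- ===== SOURCE A (Python) =====
-- def _links_from_groups(keys: list[str], groups: list[list[str]]) -> list[bool]:
--     key_to_gi: dict[str, int] = {}
--     for gi, g in enumerate(groups):
--         for k in g:
--             key_to_gi[k] = gi
--     return [key_to_gi.get(keys[i], -1) == key_to_gi.get(keys[i + 1], -2) for i in range(len(keys) - 1)]
--
-- def _build_display_keys(filtered_groups: list[list[str]], batch_keys: list[str], tossed_set: set[str]) -> list[str]:
--     if not filtered_groups:
--         return batch_keys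
--     keys_in_groups = {k for g in filtered_groups for k in g}
--     batch_idx = {k: i for i, k in enumerate(batch_keys)}
--     groups_by_scan = sorted(filtered_groups, key=lambda g: min(batch_idx[k] for k in g if k not in tossed_set))
--     active_ordered = [k for g in groups_by_scan for k in g if k not in tossed_set]
--     active_iter = iter(active_ordered)
--     result = []
--     for k in batch_keys:
--         if k in tossed_set:
--             result.append(k)
--         elif k in keys_in_groups:
--             result.append(next(active_iter, k))
--         else:
--             result.append(k)
--     return result
--
-- def _split_groups_at_tossed_boundaries(groups: list[list[str]], batch_keys: list[str], tossed_set: set[str]) -> list[list[str]]: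
--     batch_idx = {k: i for i, k in enumerate(batch_keys)}
--     result = []
--     for g in groups:
--         active = [k for k in g if k not in tossed_set]
--         if not active:
--             continue
--         current = [active[0]]
--         for i in range(1, len(active)):
--             idx_prev = batch_idx[active[i - 1]]
--             idx_curr = batch_idx[active[i]]
--             lo, hi = min(idx_prev, idx_curr), max(idx_prev, idx_curr)
--             if any(batch_keys[j] in tossed_set for j in range(lo + 1, hi)):
--                 result.append(current)
--                 current = [active[i]]
--             else:
--                 current.append(active[i])
--         result.append(current)
--     return result
--
-- def build_display_state(
--     batch_keys: list[str],
--     batch_groups: list[list[str]],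
--     tossed_set: set[str],
-- ) -> tuple[list[str], list[str], list[bool]]:
--     filtered = _split_groups_at_tossed_boundaries(batch_groups, batch_keys, tossed_set)
--     display_keys = _build_display_keys(filtered, batch_keys, tossed_set)
--     active_keys = [k for k in display_keys if k not in tossed_set]
--     active_links = _links_from_groups(active_keys, filtered) if filtered else [False] * max(0, len(active_keys) - 1)
--     return display_keys, active_keys, active_links
-- ===== SOURCE B (Python) =====
-- def build_display_state(
--     batch_keys: list[str],
--     batch_groups: list[list[str]],
--     tossed_set: set[str],
-- ) -> tuple[list[str], list[str], list[bool]]: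
--     n = len(batch_keys)
--     # one pass: last-occurrence index of every key, plus prefix counts of tossed keys
--     batch_idx: dict[str, int] = {}
--     pref = [0] * (n + 1)
--     for i, k in enumerate(batch_keys):
--         batch_idx[k] = i
--         pref[i + 1] = pref[i] + (1 if k in tossed_set else 0)
--
--     # split groups at tossed boundaries in one pass per group;
--     # pref answers "any tossed key strictly between two batch positions?" in O(1)
--     pieces: list[tuple[int, list[str]]] = []  # (min batch index, keys)
--     gid: dict[str, int] = {}                  # key -> index of its (last) piece
--     for g in batch_groups:
--         cur: list[str] = []
--         cur_min = n
--         prev = 0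
--         for k in g:
--             if k in tossed_set:
--                 continue
--             i = batch_idx[k]
--             if cur and pref[max(prev, i)] - pref[min(prev, i) + 1] > 0:
--                 pieces.append((cur_min, cur))
--                 cur = []
--                 cur_min = n
--             cur.append(k)
--             gid[k] = len(pieces)
--             if i < cur_min:
--                 cur_min = i
--             prev = i
--         if cur:
--             pieces.append((cur_min, cur))
--
--     # stable sort of the pieces by their precomputed minimal batch position
--     active_ordered = [k for _, g in sorted(pieces, key=lambda p: p[0]) for k in g]
--
--     # single pass producing display keys and active keys together
--     display: list[str] = []
--     active: list[str] = []
--     it = 0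
--     for k in batch_keys:
--         if k not in tossed_set and k in gid:
--             k2 = active_ordered[it] if it < len(active_ordered) else k
--             it += 1
--             display.append(k2)
--             active.append(k2)
--         else:
--             display.append(k)
--             if k not in tossed_set:
--                 active.append(k)
--
--     links = [gid.get(a, -1) == gid.get(b, -2) for a, b in zip(active, active[1:])]
--     return display, active, links
-- ===== Notes on version B (the rewrite author's own statement) =====
-- stated objective: alternative
-- what changed: B builds the last-occurrence index and a prefix-sum array of tossed counts in one pass and answers A's inner 'any tossed key strictly between two batch positions' rescan with an O(1) prefix-sum difference, while fusing A's separate passes (two dict rebuilds, per-group min recomputation inside sorted's key, separate display/active passes) into single passes that carry the piece minima and group ids along.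
-- outside the precondition, e.g. on build_display_state(['a'], [['x']], set()): A raises KeyError, B raises KeyError
import Mathlib
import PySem

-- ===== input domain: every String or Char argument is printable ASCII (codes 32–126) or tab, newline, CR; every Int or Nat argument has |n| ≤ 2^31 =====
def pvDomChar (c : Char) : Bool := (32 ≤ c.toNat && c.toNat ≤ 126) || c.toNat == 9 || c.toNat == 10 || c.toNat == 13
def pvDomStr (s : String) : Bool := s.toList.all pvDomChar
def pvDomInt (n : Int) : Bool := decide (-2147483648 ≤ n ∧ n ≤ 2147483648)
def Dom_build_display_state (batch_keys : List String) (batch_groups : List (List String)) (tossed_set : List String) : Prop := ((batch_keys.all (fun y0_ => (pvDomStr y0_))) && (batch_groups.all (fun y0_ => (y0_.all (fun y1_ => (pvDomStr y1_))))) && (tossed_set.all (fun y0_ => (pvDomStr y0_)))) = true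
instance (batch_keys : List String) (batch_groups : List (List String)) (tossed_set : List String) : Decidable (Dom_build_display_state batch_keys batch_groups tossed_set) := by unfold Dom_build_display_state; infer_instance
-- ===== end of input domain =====

-- B answers A's inner rescan ("any tossed key strictly between two batch positions?") with a
-- prefix-sum array and fuses A's repeated passes (two dict builds, per-group min recomputation,
-- separate display/active passes) into single passes; equivalence is proved on Pre_
-- (A raises KeyError outside it).

-- ===== PORT A =====
-- batch_idx = {k: i for i, k in enumerate(batch_keys)}
def pvAIdx (batch_keys : List String) : PySem.Dict String Int :=
  (PySem.List.enumerate batch_keys).foldl (fun d p => d.insert p.2 p.1) PySem.Dict.empty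

-- _links_from_groups
def pvALinks (keys : List String) (groups : List (List String)) : List Bool :=
  let key_to_gi : PySem.Dict String Int :=
    (PySem.List.enumerate groups).foldl (fun d p => p.2.foldl (fun d k => d.insert k p.1) d)
      PySem.Dict.empty
  (PySem.List.pyRange 0 ((keys.length : Int) - 1)).map (fun i =>
    key_to_gi.getD (PySem.List.pyGetD keys i "") (-1) ==
      key_to_gi.getD (PySem.List.pyGetD keys (i + 1) "") (-2))

-- _build_display_keys  (batch_idx[k] is getD _ 0: under Pre_ every looked-up key is present)
def pvADisplay (filtered_groups : List (List String)) (batch_keys tossed_set : List String) :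
    List String :=
  if filtered_groups = [] then batch_keys else
  let keys_in_groups : PySem.Set String := PySem.Set.ofList (filtered_groups.flatMap (fun g => g))
  let batch_idx := pvAIdx batch_keys
  let groups_by_scan := PySem.List.sorted filtered_groups
    (fun g => PySem.List.minD
      ((g.filter (fun k => !(tossed_set.contains k))).map (fun k => batch_idx.getD k 0))
      (fun v => v) 0)
  let active_ordered := groups_by_scan.flatMap (fun g => g.filter (fun k => !(tossed_set.contains k)))
  let st := batch_keys.foldl
    (fun (st : List String × List String) k =>
      if tossed_set.contains k then (st.1 ++ [k], st.2)
      else if keys_in_groups.contains k then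
        match st.2 with
        | [] => (st.1 ++ [k], [])
        | x :: rest => (st.1 ++ [x], rest)
      else (st.1 ++ [k], st.2))
    ([], active_ordered)
  st.1

-- _split_groups_at_tossed_boundaries  (batch_idx[...] is getD _ 0, exact under Pre_)
def pvASplit (groups : List (List String)) (batch_keys tossed_set : List String) :
    List (List String) :=
  let batch_idx := pvAIdx batch_keys
  groups.foldl (fun result g =>
    let active := g.filter (fun k => !(tossed_set.contains k))
    if active = [] then result
    else
      let st := (PySem.List.pyRange 1 (active.length : Int)).foldl
        (fun (st : List (List String) × List String) i =>
          let idx_prev := batch_idx.getD (PySem.List.pyGetD active (i - 1) "") 0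
          let idx_curr := batch_idx.getD (PySem.List.pyGetD active i "") 0
          let lo := min idx_prev idx_curr
          let hi := max idx_prev idx_curr
          if (PySem.List.pyRange (lo + 1) hi).any
              (fun j => tossed_set.contains (PySem.List.pyGetD batch_keys j "")) then
            (st.1 ++ [st.2], [PySem.List.pyGetD active i ""])
          else (st.1, st.2 ++ [PySem.List.pyGetD active i ""]))
        (result, [PySem.List.pyGetD active 0 ""])
      st.1 ++ [st.2]) []

def build_display_state (batch_keys : List String) (batch_groups : List (List String))
    (tossed_set : List String) : List String × List String × List Bool :=
  let filtered := pvASplit batch_groups batch_keys tossed_set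
  let display_keys := pvADisplay filtered batch_keys tossed_set
  let active_keys := display_keys.filter (fun k => !(tossed_set.contains k))
  let active_links :=
    if filtered = [] then List.replicate (max 0 ((active_keys.length : Int) - 1)).toNat false
    else pvALinks active_keys filtered
  (display_keys, active_keys, active_links)

-- ===== PORT B =====
-- the single pass building batch_idx and the prefix counts of tossed keys
def pvBPrep (tossed_set : List String) :
    List String → PySem.Dict String Int → List Int → Int → PySem.Dict String Int × List Int
  | [], d, pref, _ => (d, pref)
  | k :: ks, d, pref, i =>
    pvBPrep tossed_set ks (d.insert k i)
      (pref ++ [pref.getLastD 0 + (if tossed_set.contains k then 1 else 0)]) (i + 1)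

-- the inner loop over one group's keys
def pvBGroup (tossed_set : List String) (bidx : PySem.Dict String Int) (pref : List Int) (n : Int) :
    List String → List (Int × List String) → PySem.Dict String Int → List String → Int → Int →
      List (Int × List String) × PySem.Dict String Int × List String × Int
  | [], pieces, gid, cur, cur_min, _ => (pieces, gid, cur, cur_min)
  | k :: ks, pieces, gid, cur, cur_min, prev =>
    if tossed_set.contains k then pvBGroup tossed_set bidx pref n ks pieces gid cur cur_min prev
    else
      let i := bidx.getD k 0
      if cur ≠ [] ∧ PySem.List.pyGetD pref (max prev i) 0 -
          PySem.List.pyGetD pref (min prev i + 1) 0 > 0 then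
        let pieces' := pieces ++ [(cur_min, cur)]
        pvBGroup tossed_set bidx pref n ks pieces' (gid.insert k (pieces'.length : Int)) [k]
          (if i < n then i else n) i
      else
        pvBGroup tossed_set bidx pref n ks pieces (gid.insert k (pieces.length : Int)) (cur ++ [k])
          (if i < cur_min then i else cur_min) i

-- the loop over the groups
def pvBSplit (tossed_set : List String) (bidx : PySem.Dict String Int) (pref : List Int) (n : Int) :
    List (List String) → List (Int × List String) → PySem.Dict String Int →
      List (Int × List String) × PySem.Dict String Int
  | [], pieces, gid => (pieces, gid)
  | g :: gs, pieces, gid =>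
    let r := pvBGroup tossed_set bidx pref n g pieces gid [] n 0
    pvBSplit tossed_set bidx pref n gs
      (if r.2.2.1 ≠ [] then r.1 ++ [(r.2.2.2, r.2.2.1)] else r.1) r.2.1

-- the single pass producing display keys and active keys together
def pvBLoop (tossed_set : List String) (gid : PySem.Dict String Int) (ao : List String) :
    List String → List String → List String → Int → List String × List String
  | [], display, active, _ => (display, active)
  | k :: ks, display, active, it =>
    if !(tossed_set.contains k) && gid.contains k then
      let k2 := if it < (ao.length : Int) then PySem.List.pyGetD ao it "" else k
      pvBLoop tossed_set gid ao ks (display ++ [k2]) (active ++ [k2]) (it + 1)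
    else
      pvBLoop tossed_set gid ao ks (display ++ [k])
        (if !(tossed_set.contains k) then active ++ [k] else active) it

def build_display_state_alt (batch_keys : List String) (batch_groups : List (List String))
    (tossed_set : List String) : List String × List String × List Bool :=
  let n := (batch_keys.length : Int)
  let r0 := pvBPrep tossed_set batch_keys PySem.Dict.empty [0] 0
  let r1 := pvBSplit tossed_set r0.1 r0.2 n batch_groups [] PySem.Dict.empty
  let gid := r1.2
  let active_ordered := (PySem.List.sorted r1.1 (fun p => p.1)).flatMap (fun p => p.2)
  let r2 := pvBLoop tossed_set gid active_ordered batch_keys [] [] 0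
  let links := (r2.2.zip r2.2.tail).map (fun p => gid.getD p.1 (-1) == gid.getD p.2 (-2))
  (r2.1, r2.2, links)

-- ===== PRECONDITION & SPEC =====
-- Pre_ excludes exactly the inputs on which A raises KeyError: a group key that is neither
-- tossed nor present in batch_keys.
def Pre_build_display_state (batch_keys : List String) (batch_groups : List (List String))
    (tossed_set : List String) : Prop :=
  (batch_groups.all (fun g => g.all (fun k => tossed_set.contains k || batch_keys.contains k))) = true
instance (batch_keys : List String) (batch_groups : List (List String)) (tossed_set : List String) :
    Decidable (Pre_build_display_state batch_keys batch_groups tossed_set) := by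
  unfold Pre_build_display_state; infer_instance

def pvWitness_build_display_state : List String × List (List String) × List String :=
  (["a", "b", "c", "d"], [["a", "c"], ["d"]], ["b"])

def Spec_build_display_state (batch_keys : List String) (batch_groups : List (List String))
    (tossed_set : List String) (out : List String × List String × List Bool) : Prop :=
  out = build_display_state_alt batch_keys batch_groups tossed_set
instance (batch_keys : List String) (batch_groups : List (List String)) (tossed_set : List String)
    (out : List String × List String × List Bool) :
    Decidable (Spec_build_display_state batch_keys batch_groups tossed_set out) := by
  unfold Spec_build_display_state; infer_instance

-- ===== CLAIM =====
def Claim_equal_build_display_state : Prop :=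
  ∀ (batch_keys : List String) (batch_groups : List (List String)) (tossed_set : List String),
    Dom_build_display_state batch_keys batch_groups tossed_set →
    Pre_build_display_state batch_keys batch_groups tossed_set →
    Spec_build_display_state batch_keys batch_groups tossed_set
      (build_display_state batch_keys batch_groups tossed_set)

-- ===== LEMMAS AND PROOFS =====

-- last-wins index of a key (what A's batch_idx dict stores), as a total function
def pvIdx (batch_keys : List String) (k : String) : Int := (pvAIdx batch_keys).getD k 0

-- the boundary test of A, as a function of the two adjacent keys
def pvBdry (batch_keys tossed_set : List String) (p q : String) : Bool :=
  (PySem.List.pyRange (min (pvIdx batch_keys p) (pvIdx batch_keys q) + 1)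
      (max (pvIdx batch_keys p) (pvIdx batch_keys q))).any
    (fun j => tossed_set.contains (PySem.List.pyGetD batch_keys j ""))

-- split of one group's remaining active keys into chunks: (finished chunks, current chunk)
def pvSP (B : String → String → Bool) : String → List String → List String →
    List (List String) × List String
  | _, cur, [] => ([], cur)
  | prev, cur, y :: ys =>
    if B prev y then
      let r := pvSP B y [y] ys
      (cur :: r.1, r.2)
    else pvSP B y (cur ++ [y]) ys

-- the key→group-index dict built from a list of chunks starting at index base
def pvGid (base : Int) : List (List String) → PySem.Dict String Int → PySem.Dict String Int
  | [], d => d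
  | c :: cs, d => pvGid (base + 1) cs (c.foldl (fun d k => d.insert k base) d)

-- running minimum of last-wins indices, seeded with m
def pvMin (batch_keys : List String) (m : Int) (c : List String) : Int :=
  c.foldl (fun m k => if pvIdx batch_keys k < m then pvIdx batch_keys k else m) m

-- prefix array of tossed counts, as B builds it
def pvPref (batch_keys tossed_set : List String) : List Int :=
  (pvBPrep tossed_set batch_keys PySem.Dict.empty [0] 0).2

-- count of tossed keys among the first j batch keys
def pvCnt (batch_keys tossed_set : List String) (j : Nat) : Int :=
  (((batch_keys.take j).countP (fun k => tossed_set.contains k) : Nat) : Int)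

-- properties every piece produced by the split satisfies
def pvPieceProps (batch_keys tossed_set : List String) (ps : List (Int × List String)) : Prop :=
  ∀ p ∈ ps, p.2 ≠ [] ∧ (∀ k ∈ p.2, tossed_set.contains k = false ∧ k ∈ batch_keys) ∧
    p.1 = pvMin batch_keys (batch_keys.length : Int) p.2

-- ---- prep stage ----
theorem pvBPrep_fst (t : List String) : ∀ (ks : List String) (d : PySem.Dict String Int)
    (pref : List Int) (i : Int),
    (pvBPrep t ks d pref i).1 = (PySem.List.enumerate ks i).foldl (fun d p => d.insert p.2 p.1) d := by
  intro ks
  induction ks with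
  | nil => intro d pref i; simp [pvBPrep, PySem.List.enumerate]
  | cons k ks ih =>
    intro d pref i
    simp only [pvBPrep, PySem.List.enumerate_cons, List.foldl_cons]
    exact ih _ _ _

theorem pvBPrep_snd (t : List String) : ∀ (ks : List String) (d : PySem.Dict String Int)
    (pref : List Int) (i : Int),
    (pvBPrep t ks d pref i).2 =
      pref ++ (List.range ks.length).map
        (fun j => pref.getLastD 0 + (((ks.take (j+1)).countP (fun k => t.contains k) : Nat) : Int)) := by
  intro ks
  induction ks with
  | nil => intro d pref i; simp [pvBPrep]
  | cons k ks ih =>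
    intro d pref i
    simp only [pvBPrep]
    rw [ih]
    rw [List.getLastD_concat, List.length_cons, List.range_succ_eq_map]
    simp only [List.map_cons, List.map_map]
    rw [List.append_assoc]
    congr 1
    simp only [List.take_succ_cons, List.countP_cons, List.cons_append, List.nil_append]
    congr 1
    · push_cast; by_cases h : t.contains k <;> simp [h]
    · apply List.map_congr_left
      intro j _
      simp only [Function.comp, List.take_succ_cons, List.countP_cons]
      push_cast
      by_cases h : t.contains k <;> simp [h] <;> ring

theorem pvPref_get (bk t : List String) (j : Nat) (hj : j ≤ bk.length) :
    PySem.List.pyGetD (pvPref bk t) (j : Int) 0 = pvCnt bk t j := by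
  unfold pvPref
  rw [pvBPrep_snd]
  rw [PySem.List.pyGetD_natCast]
  match j with
  | 0 => simp [pvCnt]
  | (m+1) =>
    simp only [show ([0] : List Int).getLastD 0 = 0 from rfl, List.singleton_append,
      List.getD_cons_succ]
    rw [List.getD_eq_getElem?_getD]
    rw [List.getElem?_map]
    have hm : m < bk.length := by omega
    simp [List.getElem?_range hm, pvCnt]

theorem pvCnt_mono (bk t : List String) {j j' : Nat} (h : j ≤ j') :
    pvCnt bk t j ≤ pvCnt bk t j' := by
  unfold pvCnt
  have : bk.take j' = bk.take j ++ (bk.drop j).take (j' - j) := by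
    rw [← List.take_add]; congr 1; omega
  rw [this, List.countP_append]
  push_cast
  omega

-- ---- batch_idx stage ----
theorem pvIdx_foldl_not_mem (k : String) : ∀ (l : List String) (s : Int)
    (d : PySem.Dict String Int), k ∉ l →
    ((PySem.List.enumerate l s).foldl (fun d p => d.insert p.2 p.1) d).getD k 0 = d.getD k 0 := by
  intro l
  induction l with
  | nil => intro s d _; simp [PySem.List.enumerate]
  | cons x l ih =>
    intro s d hk
    simp only [PySem.List.enumerate_cons, List.foldl_cons]
    rw [ih _ _ (by simp at hk; exact hk.2)]
    rw [PySem.Dict.getD_insert]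
    simp at hk
    simp [hk.1]

theorem pvIdx_foldl_mem (k : String) : ∀ (l : List String) (s : Int)
    (d : PySem.Dict String Int), k ∈ l →
    ∃ j : Nat, j < l.length ∧
      ((PySem.List.enumerate l s).foldl (fun d p => d.insert p.2 p.1) d).getD k 0 = s + j := by
  intro l
  induction l with
  | nil => intro s d h; simp at h
  | cons x l ih =>
    intro s d hk
    simp only [PySem.List.enumerate_cons, List.foldl_cons]
    by_cases hl : k ∈ l
    · obtain ⟨j, hj, hval⟩ := ih (s+1) (d.insert x s) hl
      exact ⟨j+1, by simpa using Nat.succ_lt_succ hj, by rw [hval]; omega⟩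
    · have hx : k = x := by simp at hk; tauto
      refine ⟨0, by simp, ?_⟩
      push_cast
      rw [add_zero, pvIdx_foldl_not_mem _ _ _ _ hl]
      rw [PySem.Dict.getD_insert]
      simp [hx]

theorem pvIdx_range (bk : List String) (k : String) (hk : k ∈ bk) :
    0 ≤ pvIdx bk k ∧ pvIdx bk k < (bk.length : Int) := by
  obtain ⟨j, hj, hval⟩ := pvIdx_foldl_mem k bk 0 PySem.Dict.empty hk
  unfold pvIdx pvAIdx
  rw [hval]
  constructor <;> [positivity; (push_cast; omega)]

-- ---- boundary stage ----
theorem pvBdry_eq (bk t : List String) (p q : String) (hp : p ∈ bk) (hq : q ∈ bk) :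
    pvBdry bk t p q =
      decide (PySem.List.pyGetD (pvPref bk t) (max (pvIdx bk p) (pvIdx bk q)) 0 -
        PySem.List.pyGetD (pvPref bk t) (min (pvIdx bk p) (pvIdx bk q) + 1) 0 > 0) := by
  obtain ⟨h0p, hlp⟩ := pvIdx_range bk p hp
  obtain ⟨h0q, hlq⟩ := pvIdx_range bk q hq
  have h0lo : 0 ≤ min (pvIdx bk p) (pvIdx bk q) := le_min h0p h0q
  have h0hi : 0 ≤ max (pvIdx bk p) (pvIdx bk q) := le_trans h0p (le_max_left _ _)
  have hminmax : min (pvIdx bk p) (pvIdx bk q) ≤ max (pvIdx bk p) (pvIdx bk q) := min_le_max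
  have hmaxlt : max (pvIdx bk p) (pvIdx bk q) < (bk.length : Int) := max_lt hlp hlq
  set lN := (min (pvIdx bk p) (pvIdx bk q)).toNat with hlN
  set hN := (max (pvIdx bk p) (pvIdx bk q)).toNat with hhN
  have hlo : min (pvIdx bk p) (pvIdx bk q) = (lN : Int) := (Int.toNat_of_nonneg h0lo).symm
  have hhi : max (pvIdx bk p) (pvIdx bk q) = (hN : Int) := (Int.toNat_of_nonneg h0hi).symm
  have hlh : lN ≤ hN := by omega
  have hNlt : hN < bk.length := by omega
  unfold pvBdry
  rw [hlo, hhi]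
  have e1 : ((lN : Int) + 1) = ((lN + 1 : Nat) : Int) := by push_cast; ring
  rw [e1, pvPref_get bk t hN (by omega), pvPref_get bk t (lN + 1) (by omega)]
  by_cases hc : hN ≤ lN + 1
  · rw [PySem.List.pyRange_one_eq_nil (by exact_mod_cast by omega : (hN : Int) ≤ (lN + 1 : Nat))]
    have hmono : pvCnt bk t hN ≤ pvCnt bk t (lN + 1) := pvCnt_mono bk t hc
    simp only [List.any_nil]
    rw [eq_comm, decide_eq_false_iff_not]
    omega
  · set mid := (bk.drop (lN + 1)).take (hN - (lN + 1)) with hmid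
    have hsplit : bk.take hN = bk.take (lN + 1) ++ mid := by
      rw [hmid, ← List.take_add]
      congr 1
      omega
    have hcnt : pvCnt bk t hN =
        pvCnt bk t (lN + 1) + ((mid.countP (fun k => t.contains k) : Nat) : Int) := by
      unfold pvCnt
      rw [hsplit, List.countP_append]
      push_cast
      ring
    have hmidlen : mid.length = hN - (lN + 1) := by
      rw [hmid, List.length_take, List.length_drop]
      omega
    cases hb : (PySem.List.pyRange ((lN + 1 : Nat) : Int) (hN : Int)).any
        (fun j => t.contains (PySem.List.pyGetD bk j "")) with
    | false =>
      rw [eq_comm, decide_eq_false_iff_not]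
      intro hpos
      have hposN : 0 < mid.countP (fun k => t.contains k) := by omega
      obtain ⟨a, ha, hpa⟩ := List.countP_pos_iff.mp hposN
      obtain ⟨i2, hi2, rfl⟩ := List.mem_iff_getElem.mp ha
      rw [List.any_eq_false] at hb
      have hjmem : ((lN + 1 + i2 : Nat) : Int) ∈
          PySem.List.pyRange ((lN + 1 : Nat) : Int) (hN : Int) := by
        rw [PySem.List.mem_pyRange_one]
        refine ⟨?_, ?_⟩ <;> push_cast <;> omega
      have hfj := hb _ hjmem
      rw [PySem.List.pyGetD_natCast,
        List.getD_eq_getElem _ _ (by omega : lN + 1 + i2 < bk.length)] at hfj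
      have hgj : mid[i2] = bk[lN + 1 + i2]'(by omega) := by
        simp only [hmid, List.getElem_take, List.getElem_drop]
      rw [hgj] at hpa
      exact hfj hpa
    | true =>
      rw [eq_comm, decide_eq_true_eq]
      rw [List.any_eq_true] at hb
      obtain ⟨j, hjmem, hfj⟩ := hb
      rw [PySem.List.mem_pyRange_one] at hjmem
      have hj0 : 0 ≤ j := by
        have : (0 : Int) ≤ ((lN + 1 : Nat) : Int) := by positivity
        omega
      set jN := j.toNat with hjNd
      have hjN : j = (jN : Int) := (Int.toNat_of_nonneg hj0).symm
      have hb1 : lN + 1 ≤ jN := by omega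
      have hb2 : jN < hN := by omega
      rw [hjN, PySem.List.pyGetD_natCast,
        List.getD_eq_getElem _ _ (by omega : jN < bk.length)] at hfj
      have hmem : bk[jN] ∈ mid := by
        rw [List.mem_iff_getElem]
        refine ⟨jN - (lN + 1), by omega, ?_⟩
        simp only [hmid, List.getElem_take, List.getElem_drop]
        congr 1
        omega
      have hposN : 0 < mid.countP (fun k => t.contains k) :=
        List.countP_pos_iff.mpr ⟨_, hmem, hfj⟩
      omega

-- ---- pvSP structural facts ----
theorem pvSP_props (B : String → String → Bool) : ∀ (ys : List String) (p : String)
    (cur : List String), cur ≠ [] →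
    ((pvSP B p cur ys).2 ≠ [] ∧ (∀ c ∈ (pvSP B p cur ys).1, c ≠ [])) ∧
    ((∀ k ∈ (pvSP B p cur ys).2, k ∈ cur ∨ k ∈ ys) ∧
      (∀ c ∈ (pvSP B p cur ys).1, ∀ k ∈ c, k ∈ cur ∨ k ∈ ys)) := by
  intro ys
  induction ys with
  | nil =>
    intro p cur h
    exact ⟨⟨h, by simp [pvSP]⟩, by simp [pvSP], by simp [pvSP]⟩
  | cons y ys ih =>
    intro p cur h
    by_cases hb : B p y = true
    · have := ih y [y] (by simp)
      simp only [pvSP, hb, if_true]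
      refine ⟨⟨this.1.1, ?_⟩, ?_, ?_⟩
      · intro c hc
        rcases List.mem_cons.mp hc with rfl | hc
        · exact h
        · exact this.1.2 c hc
      · intro k hk
        rcases this.2.1 k hk with hk | hk
        · simp at hk; subst hk; simp
        · simp [hk]
      · intro c hc k hk
        rcases List.mem_cons.mp hc with rfl | hc
        · exact Or.inl hk
        · rcases this.2.2 c hc k hk with hk | hk
          · simp at hk; subst hk; simp
          · simp [hk]
    · have hb' : B p y = false := by simpa using hb
      have := ih y (cur ++ [y]) (by simp)
      simp only [pvSP, hb', Bool.false_eq_true, if_false]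
      refine ⟨this.1, ?_, ?_⟩
      · intro k hk
        rcases this.2.1 k hk with hk | hk
        · rcases List.mem_append.mp hk with hk | hk
          · exact Or.inl hk
          · simp at hk; subst hk; simp
        · simp [hk]
      · intro c hc k hk
        rcases this.2.2 c hc k hk with hk | hk
        · rcases List.mem_append.mp hk with hk | hk
          · exact Or.inl hk
          · simp at hk; subst hk; simp
        · simp [hk]

-- ---- A's inner index fold = pvSP ----
theorem pvA_inner (bk t : List String) : ∀ (xs pre : List String) (x : String)
    (res : List (List String)) (cur : List String),
    ((PySem.List.pyRange ((pre.length : Int) + 1) (((pre ++ x :: xs).length : Int))).foldl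
      (fun (st : List (List String) × List String) i =>
        let idx_prev := (pvAIdx bk).getD (PySem.List.pyGetD (pre ++ x :: xs) (i - 1) "") 0
        let idx_curr := (pvAIdx bk).getD (PySem.List.pyGetD (pre ++ x :: xs) i "") 0
        let lo := min idx_prev idx_curr
        let hi := max idx_prev idx_curr
        if (PySem.List.pyRange (lo + 1) hi).any
            (fun j => t.contains (PySem.List.pyGetD bk j "")) then
          (st.1 ++ [st.2], [PySem.List.pyGetD (pre ++ x :: xs) i ""])
        else (st.1, st.2 ++ [PySem.List.pyGetD (pre ++ x :: xs) i ""]))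
      (res, cur)) =
    (res ++ (pvSP (pvBdry bk t) x cur xs).1, (pvSP (pvBdry bk t) x cur xs).2) := by
  intro xs
  induction xs with
  | nil =>
    intro pre x res cur
    rw [PySem.List.pyRange_one_eq_nil (by simp [List.length_append])]
    simp [pvSP]
  | cons y ys ih =>
    intro pre x res cur
    have hlt : (pre.length : Int) + 1 < ((pre ++ x :: y :: ys).length : Int) := by
      simp only [List.length_append, List.length_cons]
      push_cast
      omega
    rw [PySem.List.pyRange_one_cons hlt, List.foldl_cons]
    dsimp only
    have e0 : ((pre.length : Int) + 1 - 1) = ((pre.length : Nat) : Int) := by ring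
    have e1 : ((pre.length : Int) + 1) = ((pre.length + 1 : Nat) : Int) := by push_cast; ring
    have g0 : PySem.List.pyGetD (pre ++ x :: y :: ys) ((pre.length : Int) + 1 - 1) "" = x := by
      rw [e0, PySem.List.pyGetD_natCast,
        List.getD_eq_getElem _ _ (by simp only [List.length_append, List.length_cons]; omega),
        List.getElem_append_right (Nat.le_refl _)]
      simp
    have g1 : PySem.List.pyGetD (pre ++ x :: y :: ys) ((pre.length : Int) + 1) "" = y := by
      rw [e1, PySem.List.pyGetD_natCast,
        List.getD_eq_getElem _ _ (by simp only [List.length_append, List.length_cons]; omega),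
        List.getElem_append_right (by omega)]
      simp
    rw [g0, g1]
    have hcond : (PySem.List.pyRange
        (min ((pvAIdx bk).getD x 0) ((pvAIdx bk).getD y 0) + 1)
        (max ((pvAIdx bk).getD x 0) ((pvAIdx bk).getD y 0))).any
          (fun j => t.contains (PySem.List.pyGetD bk j "")) = pvBdry bk t x y := rfl
    rw [hcond]
    have hl : pre ++ x :: y :: ys = (pre ++ [x]) ++ y :: ys := by simp
    have e2 : (pre.length : Int) + 1 + 1 = (((pre ++ [x]).length : Nat) : Int) + 1 := by
      simp only [List.length_append, List.length_cons, List.length_nil]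
      push_cast
      ring
    by_cases hbd : pvBdry bk t x y
    · rw [if_pos hbd]
      simp only [hl, e2]
      rw [ih (pre ++ [x]) y (res ++ [cur]) [y]]
      simp [pvSP, hbd]
    · rw [if_neg hbd]
      simp only [hl, e2]
      rw [ih (pre ++ [x]) y res (cur ++ [y])]
      simp [pvSP, hbd]

-- ---- gid lemmas ----
theorem pvGid_append : ∀ (cs : List (List String)) (c : List String) (b : Int)
    (d : PySem.Dict String Int),
    pvGid b (cs ++ [c]) d = c.foldl (fun d k => d.insert k (b + (cs.length : Int))) (pvGid b cs d) := by
  intro cs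
  induction cs with
  | nil => intro c b d; simp [pvGid]
  | cons a cs ih =>
    intro c b d
    simp only [List.cons_append, pvGid]
    rw [ih]
    have h1 : b + ((a :: cs).length : Int) = b + 1 + (cs.length : Int) := by
      simp only [List.length_cons]
      push_cast
      ring
    rw [h1]

theorem pvGid_contains (k : String) : ∀ (cs : List (List String)) (b : Int)
    (d : PySem.Dict String Int),
    (pvGid b cs d).contains k = (d.contains k || (cs.flatMap (fun c => c)).contains k) := by
  have inner : ∀ (c : List String) (v : Int) (d : PySem.Dict String Int),
      ((c.foldl (fun d k => d.insert k v) d).contains k) = (d.contains k || c.contains k) := by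
    intro c
    induction c with
    | nil => intro v d; simp
    | cons a c ih =>
      intro v d
      simp only [List.foldl_cons, List.contains_cons]
      rw [ih, PySem.Dict.contains_insert]
      cases h1 : d.contains k <;> cases h2 : k == a <;> simp [h1, h2]
  intro cs
  induction cs with
  | nil => intro b d; simp [pvGid]
  | cons c cs ih =>
    intro b d
    simp only [pvGid, List.flatMap_cons]
    rw [ih, inner, List.contains_append]
    cases d.contains k <;> simp

-- ---- B's group loop ----
theorem pvBGroup_filter (t : List String) (bidx : PySem.Dict String Int) (pref : List Int)
    (n : Int) : ∀ (ks : List String) (pieces : List (Int × List String))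
    (gid : PySem.Dict String Int) (cur : List String) (cm pv : Int),
    pvBGroup t bidx pref n ks pieces gid cur cm pv =
      pvBGroup t bidx pref n (ks.filter (fun k => !t.contains k)) pieces gid cur cm pv := by
  intro ks
  induction ks with
  | nil => intro pieces gid cur cm pv; simp [pvBGroup]
  | cons k ks ih =>
    intro pieces gid cur cm pv
    by_cases h : t.contains k = true
    · simp only [pvBGroup, h, if_true, List.filter_cons, Bool.not_eq_eq_eq_not, Bool.not_true]
      simp [h, ih]
    · simp only [Bool.not_eq_true] at h
      simp only [pvBGroup, h, List.filter_cons, Bool.not_false, if_true, if_false,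
        Bool.false_eq_true]
      split <;> exact ih _ _ _ _ _

theorem pvBGroup_main (bk t : List String) : ∀ (ys : List String)
    (pieces : List (Int × List String)) (cur : List String) (hcur : cur ≠ [])
    (hys : ∀ k ∈ ys, t.contains k = false ∧ k ∈ bk) (hcurb : ∀ k ∈ cur, k ∈ bk),
    pvBGroup t (pvAIdx bk) (pvPref bk t) (bk.length : Int) ys pieces
      (pvGid 0 (pieces.map Prod.snd ++ [cur]) PySem.Dict.empty) cur
      (pvMin bk (bk.length : Int) cur) (pvIdx bk (cur.getLast hcur)) =
    (pieces ++ (pvSP (pvBdry bk t) (cur.getLast hcur) cur ys).1.map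
        (fun c => (pvMin bk (bk.length : Int) c, c)),
     pvGid 0 (pieces.map Prod.snd ++ ((pvSP (pvBdry bk t) (cur.getLast hcur) cur ys).1 ++
        [(pvSP (pvBdry bk t) (cur.getLast hcur) cur ys).2])) PySem.Dict.empty,
     (pvSP (pvBdry bk t) (cur.getLast hcur) cur ys).2,
     pvMin bk (bk.length : Int) (pvSP (pvBdry bk t) (cur.getLast hcur) cur ys).2) := by
  intro ys
  induction ys with
  | nil =>
    intro pieces cur hcur hys hcurb
    simp [pvBGroup, pvSP]
  | cons y ys ih =>
    intro pieces cur hcur hys hcurb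
    obtain ⟨hty, hyb⟩ := hys y (by simp)
    have hlast : cur.getLast hcur ∈ bk := hcurb _ (List.getLast_mem hcur)
    have hbeq := pvBdry_eq bk t (cur.getLast hcur) y hlast hyb
    simp only [pvBGroup, hty, Bool.false_eq_true, if_false]
    by_cases hbd : pvBdry bk t (cur.getLast hcur) y = true
    · have hcond : cur ≠ [] ∧
          PySem.List.pyGetD (pvPref bk t)
            (max (pvIdx bk (cur.getLast hcur)) ((pvAIdx bk).getD y 0)) 0 -
          PySem.List.pyGetD (pvPref bk t)
            (min (pvIdx bk (cur.getLast hcur)) ((pvAIdx bk).getD y 0) + 1) 0 > 0 := by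
        refine ⟨hcur, ?_⟩
        rw [hbeq] at hbd
        exact of_decide_eq_true hbd
      rw [if_pos hcond]
      have hg : ((pvGid 0 (pieces.map Prod.snd ++ [cur]) PySem.Dict.empty).insert y
            (((pieces ++ [(pvMin bk (bk.length : Int) cur, cur)]).length : Nat) : Int)) =
          pvGid 0 ((pieces ++ [(pvMin bk (bk.length : Int) cur, cur)]).map Prod.snd ++ [[y]])
            PySem.Dict.empty := by
        rw [show (pieces ++ [(pvMin bk (bk.length : Int) cur, cur)]).map Prod.snd ++ [[y]] =
          (pieces.map Prod.snd ++ [cur]) ++ [[y]] from by simp]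
        rw [pvGid_append (cs := pieces.map Prod.snd ++ [cur]) (c := [y])]
        simp only [List.foldl_cons, List.foldl_nil]
        congr 1 <;> simp
      have hmin1 : (if (pvAIdx bk).getD y 0 < (bk.length : Int) then (pvAIdx bk).getD y 0
          else (bk.length : Int)) = pvMin bk (bk.length : Int) [y] := by
        simp [pvMin, pvIdx]
      have hprev1 : (pvAIdx bk).getD y 0 = pvIdx bk (([y] : List String).getLast (by simp)) := by
        simp [pvIdx]
      rw [hg, hmin1, hprev1]
      rw [ih (pieces ++ [(pvMin bk (bk.length : Int) cur, cur)]) [y] (by simp)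
        (fun k hk => hys k (by simp [hk])) (fun k hk => by simp at hk; subst hk; exact hyb)]
      have hsp : pvSP (pvBdry bk t) (cur.getLast hcur) cur (y :: ys) =
          ((cur :: (pvSP (pvBdry bk t) y [y] ys).1), (pvSP (pvBdry bk t) y [y] ys).2) := by
        simp [pvSP, hbd]
      rw [hsp]
      simp [List.getLast_singleton]
    · have hbd' : pvBdry bk t (cur.getLast hcur) y = false := by simpa using hbd
      have hcond : ¬(cur ≠ [] ∧
          PySem.List.pyGetD (pvPref bk t)
            (max (pvIdx bk (cur.getLast hcur)) ((pvAIdx bk).getD y 0)) 0 -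
          PySem.List.pyGetD (pvPref bk t)
            (min (pvIdx bk (cur.getLast hcur)) ((pvAIdx bk).getD y 0) + 1) 0 > 0) := by
        rintro ⟨-, hgt⟩
        rw [hbeq] at hbd'
        have hid : pvIdx bk y = (pvAIdx bk).getD y 0 := rfl
        rw [hid] at hbd'
        exact of_decide_eq_false hbd' hgt
      rw [if_neg hcond]
      have hg : ((pvGid 0 (pieces.map Prod.snd ++ [cur]) PySem.Dict.empty).insert y
            ((pieces.length : Nat) : Int)) =
          pvGid 0 (pieces.map Prod.snd ++ [cur ++ [y]]) PySem.Dict.empty := by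
        rw [pvGid_append (cs := pieces.map Prod.snd) (c := cur ++ [y]), List.foldl_append]
        rw [← pvGid_append (cs := pieces.map Prod.snd) (c := cur)]
        simp
      have hmin2 : (if (pvAIdx bk).getD y 0 < pvMin bk (bk.length : Int) cur
          then (pvAIdx bk).getD y 0 else pvMin bk (bk.length : Int) cur) =
          pvMin bk (bk.length : Int) (cur ++ [y]) := by
        simp [pvMin, pvIdx, List.foldl_append]
      have hprev2 : (pvAIdx bk).getD y 0 = pvIdx bk ((cur ++ [y]).getLast (by simp)) := by
        simp [pvIdx, List.getLast_concat]
      rw [hg, hmin2, hprev2]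
      rw [ih pieces (cur ++ [y]) (by simp)
        (fun k hk => hys k (by simp [hk]))
        (fun k hk => by
          rcases List.mem_append.mp hk with h | h
          · exact hcurb k h
          · simp at h; subst h; exact hyb)]
      have hsp : pvSP (pvBdry bk t) (cur.getLast hcur) cur (y :: ys) =
          pvSP (pvBdry bk t) y (cur ++ [y]) ys := by
        simp [pvSP, hbd']
      rw [hsp]
      simp [List.getLast_concat]

-- ---- the split stage, outer loop ----
theorem pvSplit_main (bk t : List String) : ∀ (gs : List (List String))
    (pieces : List (Int × List String))
    (hgs : ∀ g ∈ gs, ∀ k ∈ g, t.contains k = true ∨ k ∈ bk)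
    (hprops : pvPieceProps bk t pieces),
    (pvBSplit t (pvAIdx bk) (pvPref bk t) (bk.length : Int) gs pieces
        (pvGid 0 (pieces.map Prod.snd) PySem.Dict.empty)).1.map Prod.snd =
      gs.foldl (fun result g =>
        let active := g.filter (fun k => !(t.contains k))
        if active = [] then result
        else
          let st := (PySem.List.pyRange 1 (active.length : Int)).foldl
            (fun (st : List (List String) × List String) i =>
              let idx_prev := (pvAIdx bk).getD (PySem.List.pyGetD active (i - 1) "") 0
              let idx_curr := (pvAIdx bk).getD (PySem.List.pyGetD active i "") 0
              let lo := min idx_prev idx_curr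
              let hi := max idx_prev idx_curr
              if (PySem.List.pyRange (lo + 1) hi).any
                  (fun j => t.contains (PySem.List.pyGetD bk j "")) then
                (st.1 ++ [st.2], [PySem.List.pyGetD active i ""])
              else (st.1, st.2 ++ [PySem.List.pyGetD active i ""]))
            (result, [PySem.List.pyGetD active 0 ""])
          st.1 ++ [st.2]) (pieces.map Prod.snd) ∧
    (pvBSplit t (pvAIdx bk) (pvPref bk t) (bk.length : Int) gs pieces
        (pvGid 0 (pieces.map Prod.snd) PySem.Dict.empty)).2 =
      pvGid 0 ((pvBSplit t (pvAIdx bk) (pvPref bk t) (bk.length : Int) gs pieces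
        (pvGid 0 (pieces.map Prod.snd) PySem.Dict.empty)).1.map Prod.snd) PySem.Dict.empty ∧
    pvPieceProps bk t (pvBSplit t (pvAIdx bk) (pvPref bk t) (bk.length : Int) gs pieces
        (pvGid 0 (pieces.map Prod.snd) PySem.Dict.empty)).1 := by
  intro gs
  induction gs with
  | nil =>
    intro pieces hgs hprops
    exact ⟨rfl, rfl, hprops⟩
  | cons g gs ih =>
    intro pieces hgs hprops
    have hgmem := hgs g (by simp)
    simp only [pvBSplit, List.foldl_cons]
    rw [pvBGroup_filter]
    rcases hact : g.filter (fun k => !t.contains k) with _ | ⟨a, rest⟩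
    · have hstep : pvBGroup t (pvAIdx bk) (pvPref bk t) (bk.length : Int) [] pieces
          (pvGid 0 (pieces.map Prod.snd) PySem.Dict.empty) [] (bk.length : Int) 0 =
          (pieces, pvGid 0 (pieces.map Prod.snd) PySem.Dict.empty, [], (bk.length : Int)) := rfl
      rw [hstep]
      try dsimp only
      rw [if_neg (by simp : ¬(([] : List String) ≠ []))]
      exact ih pieces (fun g' hg' => hgs g' (by simp [hg'])) hprops
    · have hamem : a ∈ g.filter (fun k => !t.contains k) := by rw [hact]; simp
      have hta : t.contains a = false := by
        have := (List.mem_filter.mp hamem).2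
        simpa using this
      have hab : a ∈ bk := by
        rcases hgmem a (List.mem_filter.mp hamem).1 with h | h
        · rw [hta] at h; simp at h
        · exact h
      have hrest : ∀ k ∈ rest, t.contains k = false ∧ k ∈ bk := by
        intro k hk
        have hkf : k ∈ g.filter (fun k => !t.contains k) := by rw [hact]; simp [hk]
        have htk : t.contains k = false := by
          have := (List.mem_filter.mp hkf).2
          simpa using this
        refine ⟨htk, ?_⟩
        rcases hgmem k (List.mem_filter.mp hkf).1 with h | h
        · rw [htk] at h; simp at h
        · exact h
      have hsp := pvSP_props (pvBdry bk t) rest a [a] (by simp)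
      set r1 := (pvSP (pvBdry bk t) a [a] rest).1 with hr1
      set r2 := (pvSP (pvBdry bk t) a [a] rest).2 with hr2
      -- the B-side group call, in one equation
      have hg1 : ((pvGid 0 (pieces.map Prod.snd) PySem.Dict.empty).insert a
            ((pieces.length : Nat) : Int)) =
          pvGid 0 (pieces.map Prod.snd ++ [[a]]) PySem.Dict.empty := by
        rw [pvGid_append]
        simp
      have hmin1 : (if (pvAIdx bk).getD a 0 < (bk.length : Int) then (pvAIdx bk).getD a 0
          else (bk.length : Int)) = pvMin bk (bk.length : Int) [a] := by
        simp [pvMin, pvIdx]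
      have hprev1 : (pvAIdx bk).getD a 0 = pvIdx bk (([a] : List String).getLast (by simp)) := by
        simp [pvIdx]
      have hstep : pvBGroup t (pvAIdx bk) (pvPref bk t) (bk.length : Int) (a :: rest) pieces
          (pvGid 0 (pieces.map Prod.snd) PySem.Dict.empty) [] (bk.length : Int) 0 =
          (pieces ++ r1.map (fun c => (pvMin bk (bk.length : Int) c, c)),
           pvGid 0 (pieces.map Prod.snd ++ (r1 ++ [r2])) PySem.Dict.empty,
           r2, pvMin bk (bk.length : Int) r2) := by
        simp only [pvBGroup, hta, Bool.false_eq_true, if_false]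
        rw [if_neg (by simp)]
        rw [hg1, hmin1, hprev1]
        exact pvBGroup_main bk t rest pieces [a] (by simp) hrest
          (fun k hk => by simp at hk; subst hk; exact hab)
      rw [hstep]
      try dsimp only
      rw [if_pos (show r2 ≠ [] by simpa using hsp.1.1)]
      -- the new accumulator and its properties
      set pieces' := (pieces ++ r1.map (fun c => (pvMin bk (bk.length : Int) c, c))) ++
        [(pvMin bk (bk.length : Int) r2, r2)] with hps
      have hmapsnd : pieces'.map Prod.snd = pieces.map Prod.snd ++ (r1 ++ [r2]) := by
        rw [hps]
        simp only [List.map_append, List.map_map, List.map_cons, List.map_nil]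
        rw [show (Prod.snd ∘ fun c => (pvMin bk (bk.length : Int) c, c)) = id from rfl]
        simp
      have hprops' : pvPieceProps bk t pieces' := by
        intro p hp
        rw [hps] at hp
        rcases List.mem_append.mp hp with hp | hp
        · rcases List.mem_append.mp hp with hp | hp
          · exact hprops p hp
          · obtain ⟨c, hc, rfl⟩ := List.mem_map.mp hp
            refine ⟨hsp.1.2 c hc, ?_, rfl⟩
            intro k hk
            rcases hsp.2.2 c hc k hk with h | h
            · simp at h; subst h; exact ⟨hta, hab⟩
            · exact hrest k h
        · simp at hp
          subst hp
          refine ⟨by simpa using hsp.1.1, ?_, rfl⟩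
          intro k hk
          rcases hsp.2.1 k hk with h | h
          · simp at h; subst h; exact ⟨hta, hab⟩
          · exact hrest k h
      rw [show pvGid 0 (pieces.map Prod.snd ++ (r1 ++ [r2])) PySem.Dict.empty =
        pvGid 0 (pieces'.map Prod.snd) PySem.Dict.empty from by rw [hmapsnd]]
      obtain ⟨ih1, ih2, ih3⟩ := ih pieces' (fun g' hg' => hgs g' (by simp [hg'])) hprops'
      -- A's step on this group
      have hA := pvA_inner bk t rest [] a (pieces.map Prod.snd) [a]
      simp only [List.nil_append, List.length_nil, Nat.cast_zero, zero_add] at hA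
      rw [if_neg (by simp : ¬((a :: rest : List String) = []))]
      rw [show PySem.List.pyGetD (a :: rest) 0 "" = a from PySem.List.pyGetD_zero_cons a rest ""]
      try dsimp only
      rw [hA]
      dsimp only
      rw [show pieces.map Prod.snd ++ r1 ++ [r2] = pieces'.map Prod.snd from by
        rw [hmapsnd, List.append_assoc]]
      exact ⟨ih1, ih2, ih3⟩


-- ---- sorting stage ----
theorem pvInsertBy_map {α β : Type} (f : α → β) (bf : β → β → Bool) (bg : α → α → Bool)
    (hb : ∀ a b, bf (f a) (f b) = bg a b) (x : α) : ∀ (l : List α),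
    PySem.List.insertBy bf (f x) (l.map f) = (PySem.List.insertBy bg x l).map f := by
  intro l
  induction l with
  | nil => simp [PySem.List.insertBy]
  | cons y l ih =>
    simp only [List.map_cons, PySem.List.insertBy, hb]
    split <;> simp [ih]

theorem pvSorted_map {α β κ : Type} [LT κ] [DecidableLT κ] (f : α → β) (key : β → κ)
    (xs : List α) :
    PySem.List.sorted (xs.map f) key = (PySem.List.sorted xs (fun x => key (f x))).map f := by
  have aux : ∀ (l : List α) (acc : List α),
      (l.map f).foldl (fun acc x => PySem.List.insertBy
          (fun a b => decide (key a < key b)) x acc) (acc.map f) =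
        (l.foldl (fun acc x => PySem.List.insertBy
          (fun a b => decide (key (f a) < key (f b))) x acc) acc).map f := by
    intro l
    induction l with
    | nil => intro acc; simp
    | cons x l ih =>
      intro acc
      simp only [List.map_cons, List.foldl_cons]
      rw [pvInsertBy_map f (fun a b => decide (key a < key b))
        (fun a b => decide (key (f a) < key (f b))) (fun a b => rfl), ih]
  simp only [PySem.List.sorted]
  simpa using aux xs []

theorem pvMem_insertBy {α : Type} (bf : α → α → Bool) (x y : α) : ∀ (l : List α),
    y ∈ PySem.List.insertBy bf x l ↔ y = x ∨ y ∈ l := by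
  intro l
  induction l with
  | nil => simp [PySem.List.insertBy]
  | cons a l ih =>
    simp only [PySem.List.insertBy]
    split
    · simp [or_comm, or_assoc, or_left_comm]
    · simp [ih, or_comm, or_assoc, or_left_comm]

theorem pvSorted_congr {α κ : Type} [LT κ] [DecidableLT κ] (k1 k2 : α → κ) : ∀ (xs : List α),
    (∀ x ∈ xs, k1 x = k2 x) →
    PySem.List.sorted xs k1 = PySem.List.sorted xs k2 := by
  have insc : ∀ (x : α) (l : List α), k1 x = k2 x → (∀ a ∈ l, k1 a = k2 a) →
      PySem.List.insertBy (fun a b => decide (k1 a < k1 b)) x l =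
        PySem.List.insertBy (fun a b => decide (k2 a < k2 b)) x l := by
    intro x l hx hl
    induction l with
    | nil => rfl
    | cons a l ih =>
      simp only [PySem.List.insertBy]
      simp only [hx, hl a (by simp)]
      split
      · rfl
      · rw [ih (fun a ha => hl a (by simp [ha]))]
  have aux : ∀ (l acc : List α), (∀ x ∈ l, k1 x = k2 x) → (∀ x ∈ acc, k1 x = k2 x) →
      l.foldl (fun acc x => PySem.List.insertBy (fun a b => decide (k1 a < k1 b)) x acc) acc =
      l.foldl (fun acc x => PySem.List.insertBy (fun a b => decide (k2 a < k2 b)) x acc) acc := by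
    intro l
    induction l with
    | nil => intro acc _ _; rfl
    | cons x l ih =>
      intro acc hl hacc
      simp only [List.foldl_cons]
      rw [insc x acc (hl x (by simp)) hacc]
      refine ih _ (fun a ha => hl a (by simp [ha])) ?_
      intro a ha
      rcases (pvMem_insertBy _ x a acc).mp ha with rfl | ha
      · exact hl a (by simp)
      · exact hacc a ha
  intro xs hxs
  simp only [PySem.List.sorted]
  exact aux xs [] hxs (by simp)

theorem pvMinD_eq (bk : List String) : ∀ (c : List String), c ≠ [] →
    (∀ k ∈ c, pvIdx bk k < (bk.length : Int)) →
    PySem.List.minD (c.map (fun k => (pvAIdx bk).getD k 0)) (fun v => v) 0 =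
      pvMin bk (bk.length : Int) c := by
  intro c hc hlt
  match c, hc with
  | k :: ks, _ =>
    simp only [PySem.List.minD, List.map_cons, PySem.List.min?_id_cons, Option.getD_some]
    have hk : pvIdx bk k < (bk.length : Int) := hlt k (by simp)
    simp only [pvMin, List.foldl_cons]
    rw [if_pos (show pvIdx bk k < (bk.length : Int) from hk)]
    rw [List.foldl_map]
    have hfun : (fun (m : Int) (k' : String) => min m ((pvAIdx bk).getD k' 0)) =
        (fun (m : Int) (k' : String) =>
          if pvIdx bk k' < m then pvIdx bk k' else m) := by
      funext m k'
      simp only [pvIdx, min_def]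
      split <;> split <;> omega
    rw [← hfun]
    rfl

theorem pvDisplay_main (t : List String) (gid : PySem.Dict String Int)
    (KIG : PySem.Set String) (ao : List String)
    (hC : ∀ k, gid.contains k = KIG.contains k) (hao : ∀ x ∈ ao, t.contains x = false) :
    ∀ (bks res act : List String) (itN : Nat),
    act = res.filter (fun k => !t.contains k) →
    pvBLoop t gid ao bks res act (itN : Int) =
      (let r := bks.foldl
        (fun (st : List String × List String) k =>
          if t.contains k then (st.1 ++ [k], st.2)
          else if KIG.contains k then
            match st.2 with
            | [] => (st.1 ++ [k], [])
            | x :: rest => (st.1 ++ [x], rest)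
          else (st.1 ++ [k], st.2)) (res, ao.drop itN)
       (r.1, r.1.filter (fun k => !t.contains k))) := by
  intro bks
  induction bks with
  | nil =>
    intro res act itN hact
    simp [pvBLoop, hact]
  | cons k bks ih =>
    intro res act itN hact
    by_cases htk : t.contains k = true
    · simp only [pvBLoop, htk, Bool.not_true, Bool.false_and, Bool.false_eq_true, if_false,
        List.foldl_cons, if_true]
      try dsimp only
      exact ih (res ++ [k]) act itN (by
        rw [hact, List.filter_append]
        have hm : k ∈ t := by simpa using htk
        simp [hm])
    · have htk' : t.contains k = false := by simpa using htk
      by_cases hck : KIG.contains k = true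
      · have hgk : gid.contains k = true := by rw [hC]; exact hck
        simp only [pvBLoop, htk', hgk, Bool.not_false, Bool.true_and, if_true,
          List.foldl_cons, hck, Bool.false_eq_true, if_false]
        by_cases hit : itN < ao.length
        · have hdrop : ao.drop itN = ao[itN] :: ao.drop (itN + 1) :=
            (List.getElem_cons_drop hit).symm
          rw [hdrop]
          rw [if_pos (show ((itN : Nat) : Int) < ((ao.length : Nat) : Int) by exact_mod_cast hit)]
          have hgd : PySem.List.pyGetD ao ((itN : Nat) : Int) "" = ao[itN] := by
            rw [PySem.List.pyGetD_natCast, List.getD_eq_getElem _ _ hit]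
          rw [hgd]
          have e1 : (((itN : Nat) : Int) + 1) = ((itN + 1 : Nat) : Int) := by push_cast; ring
          rw [e1]
          try dsimp only
          exact ih (res ++ [ao[itN]]) (act ++ [ao[itN]]) (itN + 1)
            (by
              rw [hact, List.filter_append]
              have hm : ao[itN] ∉ t := by simpa using hao _ (List.getElem_mem hit)
              simp [hm])
        · have hit' : ao.length ≤ itN := by omega
          have hdrop : ao.drop itN = [] := List.drop_eq_nil_of_le hit'
          have hdrop2 : ao.drop (itN + 1) = [] := List.drop_eq_nil_of_le (by omega)
          rw [hdrop]
          rw [if_neg (show ¬(((itN : Nat) : Int) < ((ao.length : Nat) : Int)) by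
            push_cast; omega)]
          have e1 : (((itN : Nat) : Int) + 1) = ((itN + 1 : Nat) : Int) := by push_cast; ring
          rw [e1]
          try dsimp only
          have hrec := ih (res ++ [k]) (act ++ [k]) (itN + 1)
            (by
              rw [hact, List.filter_append]
              have hm : k ∉ t := by simpa using htk'
              simp [hm])
          rw [hdrop2] at hrec
          exact hrec
      · have hck' : KIG.contains k = false := by simpa using hck
        have hgk : gid.contains k = false := by rw [hC]; exact hck'
        simp only [pvBLoop, htk', hgk, Bool.and_false, Bool.false_eq_true, if_false,
          Bool.not_false, if_true, List.foldl_cons, hck']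
        try dsimp only
        exact ih (res ++ [k]) (act ++ [k]) itN (by
          rw [hact, List.filter_append]
          have hm : k ∉ t := by simpa using htk'
          simp [hm])

theorem pvDisplay_noGroups (t : List String) (KIG : PySem.Set String) :
    ∀ (bks res : List String) (iter : List String), (∀ k ∈ bks, KIG.contains k = false) →
    bks.foldl (fun (st : List String × List String) k =>
          if t.contains k then (st.1 ++ [k], st.2)
          else if KIG.contains k then
            match st.2 with
            | [] => (st.1 ++ [k], [])
            | x :: rest => (st.1 ++ [x], rest)
          else (st.1 ++ [k], st.2)) (res, iter) = (res ++ bks, iter) := by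
  intro bks
  induction bks with
  | nil => intro res iter _; simp
  | cons k bks ih =>
    intro res iter h
    simp only [List.foldl_cons]
    have hk : KIG.contains k = false := h k (by simp)
    by_cases ht : t.contains k = true
    · simp only [ht, if_true]
      rw [ih _ _ (fun a ha => h a (by simp [ha]))]
      simp
    · simp only [Bool.not_eq_true] at ht
      simp only [ht, hk, Bool.false_eq_true, if_false]
      rw [ih _ _ (fun a ha => h a (by simp [ha]))]
      simp

-- ---- links stage ----
theorem pvLinks_zip (keys : List String) (f : String → String → Bool) :
    (PySem.List.pyRange 0 ((keys.length : Int) - 1)).map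
        (fun i => f (PySem.List.pyGetD keys i "") (PySem.List.pyGetD keys (i + 1) "")) =
      (keys.zip keys.tail).map (fun p => f p.1 p.2) := by
  apply List.ext_getElem
  · rw [List.length_map, PySem.List.length_pyRange_one, List.length_map, List.length_zip,
      List.length_tail]
    omega
  · intro i h1 h2
    have hlen : i < keys.length - 1 := by
      rw [List.length_map, PySem.List.length_pyRange_one] at h1
      omega
    have hi1 : i < keys.length := by omega
    have hi2 : i + 1 < keys.length := by omega
    simp only [List.getElem_map, PySem.List.getElem_pyRange_one, List.getElem_zip,
      List.getElem_tail]
    have e1 : (0 : Int) + (i : Nat) = ((i : Nat) : Int) := by ring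
    have e2 : ((i : Nat) : Int) + 1 = (((i + 1 : Nat)) : Int) := by push_cast; ring
    rw [e1, e2, PySem.List.pyGetD_natCast, PySem.List.pyGetD_natCast,
      List.getD_eq_getElem _ _ hi1, List.getD_eq_getElem _ _ hi2]

theorem pvZip_const_false (l : List String) :
    (l.zip l.tail).map (fun _ => false) =
      List.replicate (max 0 ((l.length : Int) - 1)).toNat false := by
  rw [List.eq_replicate_iff]
  constructor
  · rw [List.length_map, List.length_zip, List.length_tail]
    omega
  · intro b hb
    simp at hb
    exact hb.2

theorem pvGid_enum : ∀ (cs : List (List String)) (b : Int) (d : PySem.Dict String Int),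
    (PySem.List.enumerate cs b).foldl (fun d p => p.2.foldl (fun d k => d.insert k p.1) d) d =
      pvGid b cs d := by
  intro cs
  induction cs with
  | nil => intro b d; simp [pvGid, PySem.List.enumerate]
  | cons c cs ih =>
    intro b d
    simp only [PySem.List.enumerate_cons, List.foldl_cons, pvGid]
    exact ih _ _


-- flatMap helpers used by the final assembly
theorem pvFlatMap_map {α β γ : Type} (f : α → β) (g : β → List γ) : ∀ (l : List α),
    (l.map f).flatMap g = l.flatMap (fun x => g (f x)) := by
  intro l
  induction l with
  | nil => rfl
  | cons x l ih => simp only [List.map_cons, List.flatMap_cons, ih]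

theorem pvFlatMap_congr {α γ : Type} (f g : α → List γ) : ∀ (l : List α),
    (∀ x ∈ l, f x = g x) → l.flatMap f = l.flatMap g := by
  intro l
  induction l with
  | nil => intro _; rfl
  | cons x l ih =>
    intro h
    simp only [List.flatMap_cons, h x (by simp), ih (fun a ha => h a (by simp [ha]))]

-- ===== VERDICT =====
theorem build_display_state_spec : Claim_equal_build_display_state := by
  intro bk gs t _hdom hpre
  unfold Spec_build_display_state build_display_state build_display_state_alt
  have hgs : ∀ g ∈ gs, ∀ k ∈ g, t.contains k = true ∨ k ∈ bk := by
    intro g hg k hk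
    unfold Pre_build_display_state at hpre
    rw [List.all_eq_true] at hpre
    have h1 := hpre g hg
    rw [List.all_eq_true] at h1
    have h2 := h1 k hk
    by_cases hTk : t.contains k = true
    · exact Or.inl hTk
    · have hTk' : t.contains k = false := by simpa using hTk
      rw [hTk'] at h2
      simp only [Bool.false_or] at h2
      exact Or.inr (List.contains_iff_mem.mp h2)
  dsimp only
  have hprep1 : (pvBPrep t bk PySem.Dict.empty [0] 0).1 = pvAIdx bk := by
    rw [pvBPrep_fst]
    rfl
  rw [hprep1, show (pvBPrep t bk PySem.Dict.empty [0] 0).2 = pvPref bk t from rfl]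
  obtain ⟨hsm0, hgid0, hprops⟩ := pvSplit_main bk t gs [] hgs (by intro p hp; simp at hp)
  set BS := pvBSplit t (pvAIdx bk) (pvPref bk t) ((bk.length : Int)) gs [] PySem.Dict.empty
    with hBS
  set FL := pvASplit gs bk t with hFL
  have hsm : BS.1.map Prod.snd = FL := hsm0
  have hgidE : BS.2 = pvGid 0 FL PySem.Dict.empty := by
    rw [← hsm]
    exact hgid0
  have hfprops : ∀ g' ∈ FL, g' ≠ [] ∧ ∀ k ∈ g', t.contains k = false ∧ k ∈ bk := by
    intro g' hg'
    rw [← hsm] at hg'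
    obtain ⟨p, hp, rfl⟩ := List.mem_map.mp hg'
    exact ⟨(hprops p hp).1, (hprops p hp).2.1⟩
  have hC : ∀ k, BS.2.contains k =
      (PySem.Set.ofList (FL.flatMap (fun g => g))).contains k := by
    intro k
    rw [hgidE, pvGid_contains]
    rw [Bool.eq_iff_iff]
    simp only [Bool.or_eq_true, PySem.Dict.contains_empty, Bool.false_eq_true, false_or]
    rw [List.contains_iff_mem, PySem.Set.contains_iff, PySem.Set.mem_ofList]
  by_cases hfe : FL = []
  · have hP0 : BS.1 = [] := List.map_eq_nil_iff.mp (by rw [hsm, hfe])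
    have hgidP : BS.2 = PySem.Dict.empty := by rw [hgidE, hfe]; rfl
    rw [hP0, hgidP, hfe]
    rw [show PySem.List.sorted ([] : List (Int × List String)) (fun p => p.1) = [] from rfl]
    rw [show ([] : List (Int × List String)).flatMap (fun p => p.2) = [] from rfl]
    have hC0 : ∀ k, (PySem.Dict.empty : PySem.Dict String Int).contains k =
        (PySem.Set.ofList (([] : List (List String)).flatMap (fun g => g))).contains k := by
      intro k
      rfl
    have hdisp := pvDisplay_main t PySem.Dict.empty
      (PySem.Set.ofList (([] : List (List String)).flatMap (fun g => g))) [] hC0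
      (by intro x hx; simp at hx) bk [] [] 0 rfl
    rw [show (((0 : Nat) : Int)) = (0 : Int) from rfl, List.drop_zero] at hdisp
    rw [hdisp]
    dsimp only
    rw [pvDisplay_noGroups t _ bk [] [] (fun k _ => rfl)]
    dsimp only
    simp only [List.nil_append]
    rw [show pvADisplay ([] : List (List String)) bk t = bk from by simp [pvADisplay]]
    rw [if_pos trivial]
    simp only [PySem.Dict.getD_empty]
    rw [show (fun (p : String × String) => ((-1 : Int) == (-2 : Int))) =
      (fun (_ : String × String) => false) from by funext p; decide]
    rw [pvZip_const_false]
  · -- the non-empty case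
    have haonT : ∀ x ∈ (PySem.List.sorted BS.1 (fun p => p.1)).flatMap (fun p => p.2),
        t.contains x = false := by
      intro x hx
      obtain ⟨p, hp, hxp⟩ := List.mem_flatMap.mp hx
      rw [PySem.List.mem_sorted] at hp
      exact ((hprops p hp).2.1 x hxp).1
    have hdec : ∀ p ∈ BS.1, p = (pvMin bk (bk.length : Int) p.2, p.2) := by
      intro p hp
      exact Prod.ext (hprops p hp).2.2 rfl
    have hpieces : BS.1 = FL.map (fun g => (pvMin bk (bk.length : Int) g, g)) := by
      rw [← hsm, List.map_map]
      conv_lhs => rw [← List.map_id BS.1]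
      exact List.map_congr_left (fun p hp => hdec p hp)
    have hkey : ∀ g' ∈ FL,
        PySem.List.minD ((g'.filter (fun k => !(t.contains k))).map
          (fun k => (pvAIdx bk).getD k 0)) (fun v => v) 0 =
        pvMin bk (bk.length : Int) g' := by
      intro g' hg'
      obtain ⟨hne, hkp⟩ := hfprops g' hg'
      have hfeq : g'.filter (fun k => !(t.contains k)) = g' :=
        List.filter_eq_self.mpr (fun k hk => by
          have h' : k ∉ t := by simpa using (hkp k hk).1
          simp [h'])
      rw [hfeq]
      exact pvMinD_eq bk g' hne (fun k hk => (pvIdx_range bk k (hkp k hk).2).2)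
    have hsorted : PySem.List.sorted BS.1 (fun p => p.1) =
        (PySem.List.sorted FL (fun g' => PySem.List.minD
            ((g'.filter (fun k => !(t.contains k))).map (fun k => (pvAIdx bk).getD k 0))
            (fun v => v) 0)).map (fun g => (pvMin bk (bk.length : Int) g, g)) := by
      rw [hpieces, pvSorted_map]
      rw [pvSorted_congr (fun g' => PySem.List.minD
            ((g'.filter (fun k => !(t.contains k))).map (fun k => (pvAIdx bk).getD k 0))
            (fun v => v) 0) (fun g' => pvMin bk (bk.length : Int) g') FL hkey]
    have haoA : (PySem.List.sorted BS.1 (fun p => p.1)).flatMap (fun p => p.2) =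
        (PySem.List.sorted FL (fun g' => PySem.List.minD
            ((g'.filter (fun k => !(t.contains k))).map (fun k => (pvAIdx bk).getD k 0))
            (fun v => v) 0)).flatMap (fun g => g.filter (fun k => !(t.contains k))) := by
      rw [hsorted, pvFlatMap_map]
      refine pvFlatMap_congr _ _ _ (fun g' hg' => ?_)
      rw [PySem.List.mem_sorted] at hg'
      exact (List.filter_eq_self.mpr (fun k hk => by
        have h' : k ∉ t := by simpa using ((hfprops g' hg').2 k hk).1
        simp [h'])).symm
    have hdisp := pvDisplay_main t BS.2
      (PySem.Set.ofList (FL.flatMap (fun g => g)))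
      ((PySem.List.sorted BS.1 (fun p => p.1)).flatMap (fun p => p.2)) hC haonT bk [] [] 0 rfl
    rw [show (((0 : Nat) : Int)) = (0 : Int) from rfl, List.drop_zero] at hdisp
    rw [hdisp]
    dsimp only
    rw [haoA]
    rw [show pvADisplay FL bk t = (bk.foldl
      (fun (st : List String × List String) k =>
        if t.contains k then (st.1 ++ [k], st.2)
        else if (PySem.Set.ofList (FL.flatMap (fun g => g))).contains k then
          match st.2 with
          | [] => (st.1 ++ [k], [])
          | x :: rest => (st.1 ++ [x], rest)
        else (st.1 ++ [k], st.2))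
      ([], (PySem.List.sorted FL (fun g' => PySem.List.minD
            ((g'.filter (fun k => !(t.contains k))).map (fun k => (pvAIdx bk).getD k 0))
            (fun v => v) 0)).flatMap (fun g => g.filter (fun k => !(t.contains k))))).1 from by
      simp only [pvADisplay, if_neg hfe]]
    rw [if_neg hfe]
    -- links
    rw [show pvALinks ((bk.foldl
      (fun (st : List String × List String) k =>
        if t.contains k then (st.1 ++ [k], st.2)
        else if (PySem.Set.ofList (FL.flatMap (fun g => g))).contains k then
          match st.2 with
          | [] => (st.1 ++ [k], [])
          | x :: rest => (st.1 ++ [x], rest)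
        else (st.1 ++ [k], st.2))
      ([], (PySem.List.sorted FL (fun g' => PySem.List.minD
            ((g'.filter (fun k => !(t.contains k))).map (fun k => (pvAIdx bk).getD k 0))
            (fun v => v) 0)).flatMap (fun g => g.filter (fun k => !(t.contains k))))).1.filter
        (fun k => !(t.contains k))) FL =
      (((bk.foldl
      (fun (st : List String × List String) k =>
        if t.contains k then (st.1 ++ [k], st.2)
        else if (PySem.Set.ofList (FL.flatMap (fun g => g))).contains k then
          match st.2 with
          | [] => (st.1 ++ [k], [])
          | x :: rest => (st.1 ++ [x], rest)
        else (st.1 ++ [k], st.2))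
      ([], (PySem.List.sorted FL (fun g' => PySem.List.minD
            ((g'.filter (fun k => !(t.contains k))).map (fun k => (pvAIdx bk).getD k 0))
            (fun v => v) 0)).flatMap (fun g => g.filter (fun k => !(t.contains k))))).1.filter
        (fun k => !(t.contains k))).zip
        (((bk.foldl
      (fun (st : List String × List String) k =>
        if t.contains k then (st.1 ++ [k], st.2)
        else if (PySem.Set.ofList (FL.flatMap (fun g => g))).contains k then
          match st.2 with
          | [] => (st.1 ++ [k], [])
          | x :: rest => (st.1 ++ [x], rest)
        else (st.1 ++ [k], st.2))
      ([], (PySem.List.sorted FL (fun g' => PySem.List.minD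
            ((g'.filter (fun k => !(t.contains k))).map (fun k => (pvAIdx bk).getD k 0))
            (fun v => v) 0)).flatMap (fun g => g.filter (fun k => !(t.contains k))))).1.filter
        (fun k => !(t.contains k))).tail)).map
        (fun p => BS.2.getD p.1 (-1) == BS.2.getD p.2 (-2)) from by
      simp only [pvALinks]
      rw [pvGid_enum]
      rw [← hgidE]
      exact pvLinks_zip _ (fun a b => BS.2.getD a (-1) == BS.2.getD b (-2))]
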